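-- pv_equiv track=rewrite | github.com/Ataraxy-Labs/inspect | benchmarks/greptile_bench.py | _extract_file_diff
-- ===== SOURCE A (Python) =====
-- def _extract_file_diff(diff_text, file_path):
--     lines = diff_text.split("\n")
--     result = []
--     in_file = False
--     fname = file_path.split("/")[-1] if "/" in file_path else file_path
--     for line in lines:
--         if line.startswith("diff --git"):
--             in_file = file_path in line or fname in line
--         if in_file:
--             result.append(line)
--     return "\n".join(result)
-- ===== SOURCE B (Python) =====
-- def _extract_file_diff(diff_text, file_path):
--     fname = file_path.split("/")[-1] if "/" in file_path else file_path
--     sections = []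
--     for line in diff_text.split("\n"):
--         if line.startswith("diff --git"):
--             sections.append([line])
--         elif sections:
--             sections[-1].append(line)
--     out = []
--     for sec in sections:
--         if file_path in sec[0] or fname in sec[0]:
--             out.extend(sec)
--     return "\n".join(out)
-- ===== Notes on version B (the rewrite author's own statement) =====
-- stated objective: alternative
-- what changed: Replaces the stateful in_file-flag scan with a partition-then-filter decomposition: one pass groups lines into 'diff --git' sections (dropping lines before the first header), a second pass keeps whole sections whose header line matches and flattens them.
import Mathlib
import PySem

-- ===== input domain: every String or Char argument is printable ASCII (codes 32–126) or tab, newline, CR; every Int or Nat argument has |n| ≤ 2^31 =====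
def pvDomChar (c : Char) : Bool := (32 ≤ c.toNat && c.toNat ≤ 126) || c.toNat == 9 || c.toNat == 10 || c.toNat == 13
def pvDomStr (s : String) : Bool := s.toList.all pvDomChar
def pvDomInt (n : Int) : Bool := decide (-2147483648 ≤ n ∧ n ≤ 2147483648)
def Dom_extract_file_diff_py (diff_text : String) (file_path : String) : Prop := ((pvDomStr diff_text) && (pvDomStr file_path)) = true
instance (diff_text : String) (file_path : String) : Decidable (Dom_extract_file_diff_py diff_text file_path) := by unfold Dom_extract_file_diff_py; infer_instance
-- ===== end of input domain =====

-- B replaces A's stateful in_file-flag scan by a partition-into-sections pass followed by a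
-- filter-and-flatten pass over whole sections (an alternative decomposition, same cost).

-- shared by both ports: both Pythons compute fname, the header test and the match test identically
def pvFname (file_path : String) : String :=
  if PySem.Str.isIn "/" file_path then
    -- file_path.split("/")[-1]; split? is none only for sep = "" and split never returns an
    -- empty list, so both .getD defaults are unreachable
    ((PySem.List.pyGet? ((PySem.Str.split? file_path "/").getD []) (-1)).getD "")
  else file_path

def pvHeader (line : String) : Bool := PySem.Str.startswith line "diff --git"

def pvMatch (file_path fname line : String) : Bool :=
  PySem.Str.isIn file_path line || PySem.Str.isIn fname line

-- ===== PORT A =====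
-- loop body of A: recompute in_file on a header line, then append the line iff in_file
def pvStepA (file_path fname : String) (st : List String × Bool) (line : String) :
    List String × Bool :=
  let in_file := if pvHeader line then pvMatch file_path fname line else st.2
  ((if in_file then st.1 ++ [line] else st.1), in_file)

def extract_file_diff_py (diff_text : String) (file_path : String) : String :=
  let lines := (PySem.Str.split? diff_text "\n").getD []
  let fname := pvFname file_path
  let st := lines.foldl (pvStepA file_path fname) ([], false)
  PySem.Str.join "\n" st.1

-- ===== PORT B =====
-- sections[-1].append(line); on [] this is a no-op, realising Source B's 'elif sections' guard
def pvPushLine : List (List String) → String → List (List String)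
  | [], _ => []
  | [s], l => [s ++ [l]]
  | s :: t :: rest, l => s :: pvPushLine (t :: rest) l

-- loop body of B: a header starts a new section, other lines extend the last section
def pvStepB (secs : List (List String)) (line : String) : List (List String) :=
  if pvHeader line then secs ++ [[line]] else pvPushLine secs line

def extract_file_diff_py_alt (diff_text : String) (file_path : String) : String :=
  let fname := pvFname file_path
  let secs := ((PySem.Str.split? diff_text "\n").getD []).foldl pvStepB []
  PySem.Str.join "\n"
    ((secs.filter (fun s => pvMatch file_path fname (s.headD ""))).flatten)

-- ===== PRECONDITION & SPEC =====
def Spec_extract_file_diff_py (diff_text : String) (file_path : String) (out : String) : Prop := out = extract_file_diff_py_alt diff_text file_path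
instance (diff_text : String) (file_path : String) (out : String) : Decidable (Spec_extract_file_diff_py diff_text file_path out) := by unfold Spec_extract_file_diff_py; infer_instance

-- ===== CLAIM (what is proved, stated in full; the proofs are below) =====
def Claim_equal_extract_file_diff_py : Prop := ∀ (diff_text : String) (file_path : String), Dom_extract_file_diff_py diff_text file_path → Spec_extract_file_diff_py diff_text file_path (extract_file_diff_py diff_text file_path)

-- ===== LEMMAS AND PROOFS =====

-- the lines B's second pass would emit from the sections collected so far
def pvOut (fp fn : String) (secs : List (List String)) : List String :=
  (secs.filter (fun s => pvMatch fp fn (s.headD ""))).flatten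

-- whether the last collected section (the one A's in_file flag tracks) matches
def pvLast (fp fn : String) : List (List String) → Bool
  | [] => false
  | [s] => pvMatch fp fn (s.headD "")
  | _ :: t :: rest => pvLast fp fn (t :: rest)

theorem pvPushLine_ne (l : String) : ∀ (secs : List (List String)),
    (∀ s ∈ secs, s ≠ []) → ∀ s ∈ pvPushLine secs l, s ≠ []
  | [], _, s, hs => by simp [pvPushLine] at hs
  | [a], h, s, hs => by
      simp [pvPushLine] at hs
      subst hs; simp
  | a :: t :: rest, h, s, hs => by
      simp only [pvPushLine, List.mem_cons] at hs
      rcases hs with rfl | hs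
      · exact h s (by simp)
      · exact pvPushLine_ne l (t :: rest) (fun x hx => h x (List.mem_cons_of_mem _ hx)) s hs

theorem pvStepB_ne (secs : List (List String)) (l : String)
    (h : ∀ s ∈ secs, s ≠ []) : ∀ s ∈ pvStepB secs l, s ≠ [] := by
  unfold pvStepB
  split
  · intro s hs
    rcases List.mem_append.1 hs with hs | hs
    · exact h s hs
    · simp at hs; subst hs; simp
  · exact pvPushLine_ne l secs h

theorem pvLast_push (fp fn l : String) : ∀ (secs : List (List String)),
    (∀ s ∈ secs, s ≠ []) → pvLast fp fn (pvPushLine secs l) = pvLast fp fn secs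
  | [], _ => rfl
  | [a], h => by
      have ha : a ≠ [] := h a (by simp)
      cases a with
      | nil => exact absurd rfl ha
      | cons x xs => simp [pvPushLine, pvLast]
  | a :: t :: rest, h => by
      have htail : ∀ s ∈ t :: rest, s ≠ [] := fun x hx => h x (List.mem_cons_of_mem _ hx)
      have hne : pvPushLine (t :: rest) l ≠ [] := by
        cases t with
        | nil => exact absurd rfl (htail [] (by simp))
        | cons y ys => cases rest <;> simp [pvPushLine]
      cases hpl : pvPushLine (t :: rest) l with
      | nil => exact absurd hpl hne
      | cons b bs =>
          simp only [pvPushLine, hpl, pvLast]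
          rw [← hpl, pvLast_push fp fn l (t :: rest) htail]

theorem pvOut_push (fp fn l : String) : ∀ (secs : List (List String)),
    (∀ s ∈ secs, s ≠ []) →
    pvOut fp fn (pvPushLine secs l)
      = pvOut fp fn secs ++ (if pvLast fp fn secs then [l] else [])
  | [], _ => by simp [pvPushLine, pvOut, pvLast]
  | [a], h => by
      have ha : a ≠ [] := h a (by simp)
      cases a with
      | nil => exact absurd rfl ha
      | cons x xs =>
          simp only [pvPushLine, pvOut, pvLast, List.filter, List.headD]
          by_cases hm : pvMatch fp fn x = true <;> simp [hm]
  | a :: t :: rest, h => by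
      have htail : ∀ s ∈ t :: rest, s ≠ [] := fun x hx => h x (List.mem_cons_of_mem _ hx)
      have ih := pvOut_push fp fn l (t :: rest) htail
      have hl : pvLast fp fn (a :: t :: rest) = pvLast fp fn (t :: rest) := rfl
      simp only [pvOut] at ih ⊢
      simp only [List.headD_eq_head?_getD] at ih
      simp only [pvPushLine, List.filter_cons, hl]
      by_cases hm : pvMatch fp fn (a.head?.getD "") = true
      · simp [hm, ih, List.filter_cons, List.append_assoc]
      · simp [hm, ih, List.filter_cons]

theorem pvLast_append (fp fn l : String) : ∀ (secs : List (List String)),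
    pvLast fp fn (secs ++ [[l]]) = pvMatch fp fn l
  | [] => by simp [pvLast, List.headD]
  | [a] => by simp [pvLast, List.headD]
  | a :: t :: rest => by
      have := pvLast_append fp fn l (t :: rest)
      simpa [pvLast] using this

theorem pvOut_append (fp fn l : String) (secs : List (List String)) :
    pvOut fp fn (secs ++ [[l]])
      = pvOut fp fn secs ++ (if pvMatch fp fn l then [l] else []) := by
  simp only [pvOut, List.filter_append, List.flatten_append]
  by_cases hm : pvMatch fp fn l = true <;> simp [hm]

theorem pv_step_eq (fp fn line : String) (secs : List (List String))
    (h : ∀ s ∈ secs, s ≠ []) :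
    pvStepA fp fn (pvOut fp fn secs, pvLast fp fn secs) line
      = (pvOut fp fn (pvStepB secs line), pvLast fp fn (pvStepB secs line)) := by
  unfold pvStepA pvStepB
  by_cases hh : pvHeader line = true
  · simp only [hh, if_pos, pvOut_append, pvLast_append]
    by_cases hm : pvMatch fp fn line = true <;> simp [hm]
  · simp only [hh, Bool.false_eq_true, if_false,
      pvOut_push fp fn line secs h, pvLast_push fp fn line secs h]
    by_cases hb : pvLast fp fn secs = true <;> simp [hb]

theorem pv_loop_eq (fp fn : String) : ∀ (lines : List String) (secs : List (List String)),
    (∀ s ∈ secs, s ≠ []) →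
    lines.foldl (pvStepA fp fn) (pvOut fp fn secs, pvLast fp fn secs)
      = (pvOut fp fn (lines.foldl pvStepB secs), pvLast fp fn (lines.foldl pvStepB secs))
  | [], _, _ => rfl
  | line :: lines, secs, h => by
      simp only [List.foldl_cons, pv_step_eq fp fn line secs h]
      exact pv_loop_eq fp fn lines (pvStepB secs line) (pvStepB_ne secs line h)

-- ===== VERDICT (by name: the statement is the Claim_ definition above) =====
theorem extract_file_diff_py_spec : Claim_equal_extract_file_diff_py := by
  intro diff_text file_path _
  unfold Spec_extract_file_diff_py extract_file_diff_py extract_file_diff_py_alt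
  have h0 : ∀ s ∈ ([] : List (List String)), s ≠ [] := by simp
  have := pv_loop_eq file_path (pvFname file_path)
    ((PySem.Str.split? diff_text "\n").getD []) [] h0
  simp only [pvOut, pvLast, List.filter_nil, List.flatten_nil] at this
  simp only [this]
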